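-- pv_equiv track=rewrite | github.com/IoanaGabor/University | Semester-1/Fundamentals Of Programming/assignments/a4-913-Gabor-Ioana/backtracking5.py | generate_subsets_with_sum_divisible_by_k_iterative_v2
-- ===== SOURCE A (Python) =====
-- def check_valid_solution(solution_candidate, k):
--     """Checks if a solution candidate is a valid solution. A valid solution is a list of numbers which
--     have the sum divisible by k.
--
--     :param solution_candidate: list of integers
--     :param k: integer
--     :return: boolean (true if the solution candidate is a valid solution)
--     """
--     sum = 0
--     for value in solution_candidate:
--         sum += value
--     return sum % k == 0
--
-- def generate_subsets_with_sum_divisible_by_k_iterative_v2(numbers, k):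
--     subsets = [[]]
--     for number in numbers:
--         added_subsets = []
--         for subset in subsets:
--             added_subsets += [subset + [number]]
--         subsets += added_subsets
--     return [subset for subset in subsets if check_valid_solution(subset, k)]
-- ===== SOURCE B (Python) =====
-- def generate_subsets_with_sum_divisible_by_k_iterative_v2(numbers, k):
--     n = len(numbers)
--     result = []
--     for mask in range(1 << n):
--         subset = []
--         s = 0
--         for i in range(n):
--             if (mask >> i) & 1:
--                 subset.append(numbers[i])
--                 s += numbers[i]
--         if s % k == 0:
--             result.append(subset)
--     return result
-- ===== Notes on version B (the rewrite author's own statement) =====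
-- stated objective: alternative
-- what changed: Replaced A's list-doubling accumulation of all subsets followed by a separate filtering pass with a single loop over integer bitmasks 0..2^n-1 that builds each subset and its sum directly from the mask's bits and appends it when the sum is divisible by k; bit i maps to numbers[i], so the mask-counting order reproduces A's doubling order exactly.
import Mathlib
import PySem

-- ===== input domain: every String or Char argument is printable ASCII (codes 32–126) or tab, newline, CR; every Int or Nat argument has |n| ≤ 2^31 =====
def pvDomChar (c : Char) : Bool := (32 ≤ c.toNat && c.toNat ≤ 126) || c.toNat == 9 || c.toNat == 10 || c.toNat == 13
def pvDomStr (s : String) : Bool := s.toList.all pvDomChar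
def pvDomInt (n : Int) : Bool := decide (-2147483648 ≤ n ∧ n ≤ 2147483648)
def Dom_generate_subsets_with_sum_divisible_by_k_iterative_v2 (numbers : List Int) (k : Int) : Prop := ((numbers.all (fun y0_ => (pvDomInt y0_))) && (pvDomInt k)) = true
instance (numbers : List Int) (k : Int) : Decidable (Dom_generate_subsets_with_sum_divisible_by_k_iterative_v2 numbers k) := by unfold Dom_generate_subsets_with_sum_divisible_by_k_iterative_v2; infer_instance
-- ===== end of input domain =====

-- B replaces A's list-doubling subset enumeration by a loop over integer bitmasks 0..2^n-1
-- (bit i ↔ numbers[i]), building each subset and its sum directly; same output, same order (objective: alternative).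


-- ===== PORT A =====
def check_valid_solution (solution_candidate : List Int) (k : Int) : Bool :=
  let sum := solution_candidate.foldl (fun s value => s + value) 0
  PySem.Int.mod sum k == 0

def generate_subsets_with_sum_divisible_by_k_iterative_v2 (numbers : List Int) (k : Int) : List (List Int) :=
  let subsets := numbers.foldl
    (fun subsets number =>
      let added_subsets := subsets.foldl (fun acc subset => acc ++ [subset ++ [number]]) []
      subsets ++ added_subsets)
    [[]]
  subsets.filter (fun subset => check_valid_solution subset k)

-- ===== PORT B =====
-- mask loop: bit i of mask selects numbers[i]; indices i < n are always in range, so getD i 0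
-- transcribes numbers[i] exactly.
def generate_subsets_with_sum_divisible_by_k_iterative_v2_alt (numbers : List Int) (k : Int) : List (List Int) :=
  let n := numbers.length
  (List.range (1 <<< n)).foldl
    (fun result mask =>
      let p := (List.range n).foldl
        (fun (p : List Int × Int) i =>
          if (mask >>> i) &&& 1 == 1 then (p.1 ++ [numbers.getD i 0], p.2 + numbers.getD i 0) else p)
        ([], 0)
      if PySem.Int.mod p.2 k == 0 then result ++ [p.1] else result)
    []

-- ===== PRECONDITION & SPEC =====
-- Pre_ excludes k = 0, on which A raises ZeroDivisionError (x % 0).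
def Pre_generate_subsets_with_sum_divisible_by_k_iterative_v2 (numbers : List Int) (k : Int) : Prop := k ≠ 0
instance (numbers : List Int) (k : Int) : Decidable (Pre_generate_subsets_with_sum_divisible_by_k_iterative_v2 numbers k) := by unfold Pre_generate_subsets_with_sum_divisible_by_k_iterative_v2; infer_instance
def pvWitness_generate_subsets_with_sum_divisible_by_k_iterative_v2 : List Int × Int := ([1, 2, 3], 3)

def Spec_generate_subsets_with_sum_divisible_by_k_iterative_v2 (numbers : List Int) (k : Int) (out : List (List Int)) : Prop := out = generate_subsets_with_sum_divisible_by_k_iterative_v2_alt numbers k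
instance (numbers : List Int) (k : Int) (out : List (List Int)) : Decidable (Spec_generate_subsets_with_sum_divisible_by_k_iterative_v2 numbers k out) := by unfold Spec_generate_subsets_with_sum_divisible_by_k_iterative_v2; infer_instance

-- ===== CLAIM (what is proved, stated in full; the proofs are below) =====
def Claim_equal_generate_subsets_with_sum_divisible_by_k_iterative_v2 : Prop := ∀ (numbers : List Int) (k : Int), Dom_generate_subsets_with_sum_divisible_by_k_iterative_v2 numbers k → Pre_generate_subsets_with_sum_divisible_by_k_iterative_v2 numbers k → Spec_generate_subsets_with_sum_divisible_by_k_iterative_v2 numbers k (generate_subsets_with_sum_divisible_by_k_iterative_v2 numbers k)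

-- ===== LEMMAS AND PROOFS =====

-- the subset selected by the low n bits of `mask`, in index order
def pvSub (xs : List Int) (mask : Nat) : Nat → List Int
  | 0 => []
  | n + 1 => pvSub xs mask n ++ (if mask / 2 ^ n % 2 = 1 then [xs.getD n 0] else [])

lemma pvSub_congr (xs : List Int) (m₁ m₂ : Nat) :
    ∀ n, (∀ i < n, m₁ / 2 ^ i % 2 = m₂ / 2 ^ i % 2) → pvSub xs m₁ n = pvSub xs m₂ n := by
  intro n
  induction n with
  | zero => intro _; rfl
  | succ n ih =>
    intro h
    simp only [pvSub, ih (fun i hi => h i (Nat.lt_succ_of_lt hi)), h n (Nat.lt_succ_self n)]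

lemma pvSub_append (xs : List Int) (x : Int) (mask : Nat) :
    ∀ n, n ≤ xs.length → pvSub (xs ++ [x]) mask n = pvSub xs mask n := by
  intro n
  induction n with
  | zero => intro _; rfl
  | succ n ih =>
    intro h
    simp only [pvSub, ih (Nat.le_of_succ_le h),
      List.getD_append xs [x] 0 n (Nat.lt_of_succ_le h)]

lemma pvBit_high {m n : Nat} (h : m < 2 ^ n) : m / 2 ^ n % 2 = 0 := by
  rw [Nat.div_eq_of_lt h]

lemma pvBit_add_low {m n i : Nat} (hi : i < n) : (2 ^ n + m) / 2 ^ i % 2 = m / 2 ^ i % 2 := by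
  have hn : i + (n - i) = n := by omega
  have h1 : 2 ^ n + m = 2 ^ i * 2 ^ (n - i) + m := by
    rw [← Nat.pow_add, hn]
  rw [h1, Nat.mul_add_div (Nat.two_pow_pos i)]
  have h2 : 2 ^ (n - i) = 2 * 2 ^ (n - i - 1) := by
    rw [← Nat.pow_succ']; congr 1; omega
  rw [h2]; omega

lemma pvBit_add_high {m n : Nat} (h : m < 2 ^ n) : (2 ^ n + m) / 2 ^ n % 2 = 1 := by
  rw [Nat.add_div_left m (Nat.two_pow_pos n), Nat.div_eq_of_lt h]

-- A's doubling loop enumerates exactly the mask-indexed subsets, in mask order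
lemma pvDoubling (xs : List Int) :
    xs.foldl
      (fun subsets number =>
        subsets ++ subsets.foldl (fun acc subset => acc ++ [subset ++ [number]]) [])
      [[]]
    = (List.range (2 ^ xs.length)).map (fun mask => pvSub xs mask xs.length) := by
  induction xs using List.reverseRecOn with
  | nil => rfl
  | append_singleton xs x ih =>
    rw [List.foldl_append, List.foldl_cons, List.foldl_nil, ih,
      PySem.List.foldl_append_singleton_eq_map, List.nil_append, List.map_map]
    have hlen : (xs ++ [x]).length = xs.length + 1 := by simp
    rw [hlen, pow_succ, mul_two, List.range_add, List.map_append, List.map_map]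
    congr 1
    · apply List.map_congr_left
      intro m hm
      rw [List.mem_range] at hm
      show pvSub xs m xs.length = pvSub (xs ++ [x]) m (xs.length + 1)
      rw [pvSub, pvBit_high hm, pvSub_append xs x m xs.length le_rfl]
      simp
    · apply List.map_congr_left
      intro m hm
      rw [List.mem_range] at hm
      show pvSub xs m xs.length ++ [x] = pvSub (xs ++ [x]) (2 ^ xs.length + m) (xs.length + 1)
      rw [pvSub, pvBit_add_high hm, pvSub_append xs x _ xs.length le_rfl]
      · congr 1
        · exact pvSub_congr xs m _ xs.length (fun i hi => (pvBit_add_low hi).symm)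
        · simp [List.getD_eq_getElem?_getD]

-- B's inner loop computes the mask's subset together with its sum
lemma pvInner (xs : List Int) (mask : Nat) :
    ∀ n, (List.range n).foldl
        (fun (p : List Int × Int) i =>
          if (mask >>> i) &&& 1 == 1 then (p.1 ++ [xs.getD i 0], p.2 + xs.getD i 0) else p)
        ([], 0)
      = (pvSub xs mask n, (pvSub xs mask n).sum) := by
  intro n
  induction n with
  | zero => rfl
  | succ n ih =>
    rw [List.range_succ, List.foldl_append, ih, List.foldl_cons, List.foldl_nil]
    have hbit : ((mask >>> n) &&& 1 == 1) = decide (mask / 2 ^ n % 2 = 1) := by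
      rw [Nat.shiftRight_eq_div_pow, Nat.and_one_is_mod]
      rcases Nat.mod_two_eq_zero_or_one (mask / 2 ^ n) with h | h <;> simp [h]
    rw [hbit, pvSub]
    by_cases h : mask / 2 ^ n % 2 = 1 <;> simp [h]

lemma pvFoldlSum (s : List Int) : s.foldl (fun a v => a + v) 0 = s.sum := by
  rw [List.sum_eq_foldl]

-- ===== VERDICT (by name: the statement is the Claim_ definition above) =====
theorem generate_subsets_with_sum_divisible_by_k_iterative_v2_spec : Claim_equal_generate_subsets_with_sum_divisible_by_k_iterative_v2 := by
  intro numbers k _ _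
  show generate_subsets_with_sum_divisible_by_k_iterative_v2 numbers k
      = generate_subsets_with_sum_divisible_by_k_iterative_v2_alt numbers k
  unfold generate_subsets_with_sum_divisible_by_k_iterative_v2
    generate_subsets_with_sum_divisible_by_k_iterative_v2_alt
  simp only [pvDoubling, Nat.shiftLeft_eq, Nat.one_mul]
  simp only [pvInner]
  rw [PySem.List.foldl_append_if
    (fun mask => PySem.Int.mod (pvSub numbers mask numbers.length).sum k == 0)
    (fun mask => pvSub numbers mask numbers.length) (List.range (2 ^ numbers.length)) []]
  rw [List.nil_append, List.filter_map]
  congr 1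
  apply List.filter_congr
  intro mask _
  simp [Function.comp, check_valid_solution, pvFoldlSum]
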